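-- pv_equiv track=rewrite | github.com/leozaow/leoscripts | app.py | embaralhar_string
-- ===== SOURCE A (Python) =====
-- def embaralhar_string(str):
--     deslocamento3 = 4
--     deslocamento4 = 7
--     embaralhado = ""
--     for i, char in enumerate(str, start=1):
--         if i <= 10:
--             embaralhadoChar = chr(ord(char) + deslocamento3)
--         else:
--             embaralhadoChar = chr(ord(char) + deslocamento4)
--         embaralhado += embaralhadoChar
--     return embaralhado
-- ===== SOURCE B (Python) =====
-- def embaralhar_string(str):
--     first = "".join(chr(ord(c) + 4) for c in str[:10])
--     rest = "".join(chr(ord(c) + 7) for c in str[10:])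
--     return first + rest
-- ===== Notes on version B (the rewrite author's own statement) =====
-- stated objective: faster
-- what changed: Replaces the per-character positional branch inside one accumulating loop by slicing the string into its first 10 characters and the remainder, applying a uniform branch-free shift to each slice and concatenating.
import Mathlib
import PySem

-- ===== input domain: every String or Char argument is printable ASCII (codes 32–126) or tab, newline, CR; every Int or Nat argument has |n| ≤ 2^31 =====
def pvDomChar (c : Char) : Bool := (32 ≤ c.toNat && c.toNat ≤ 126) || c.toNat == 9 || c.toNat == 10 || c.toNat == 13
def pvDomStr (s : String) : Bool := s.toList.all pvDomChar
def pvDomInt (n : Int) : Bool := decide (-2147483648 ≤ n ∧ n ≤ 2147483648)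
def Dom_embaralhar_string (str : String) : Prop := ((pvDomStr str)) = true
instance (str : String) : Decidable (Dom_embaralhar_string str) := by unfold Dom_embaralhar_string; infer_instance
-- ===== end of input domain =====

-- B replaces A's per-position branch inside one accumulating loop by two uniform
-- branch-free passes over the slices str[:10] and str[10:], then concatenates (simpler).


-- ===== PORT A =====
-- A's loop: enumerate(str, start=1), branch on i ≤ 10, append the shifted char to the accumulator.
def embaralharLoopA (cs : List Char) (i : Nat) (acc : List Char) : List Char :=
  match cs with
  | [] => acc
  | c :: rest =>
    let c' := if i ≤ 10 then Char.ofNat (c.toNat + 4) else Char.ofNat (c.toNat + 7)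
    embaralharLoopA rest (i + 1) (acc ++ [c'])

def embaralhar_string (str : String) : String :=
  String.mk (embaralharLoopA str.toList 1 [])

-- ===== PORT B =====
-- B: shift str[:10] by 4 and str[10:] by 7 in two uniform passes, concatenate.
def embaralhar_string_alt (str : String) : String :=
  String.mk ((str.toList.take 10).map (fun c => Char.ofNat (c.toNat + 4)) ++
             (str.toList.drop 10).map (fun c => Char.ofNat (c.toNat + 7)))

-- ===== PRECONDITION & SPEC =====
def Spec_embaralhar_string (str : String) (out : String) : Prop := out = embaralhar_string_alt str
instance (str : String) (out : String) : Decidable (Spec_embaralhar_string str out) := by unfold Spec_embaralhar_string; infer_instance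

-- ===== CLAIM (what is proved, stated in full; the proofs are below) =====
def Claim_equal_embaralhar_string : Prop := ∀ (str : String), Dom_embaralhar_string str → Spec_embaralhar_string str (embaralhar_string str)

-- ===== LEMMAS AND PROOFS =====
theorem embaralharLoopA_eq (cs : List Char) :
    ∀ (i : Nat) (acc : List Char), 1 ≤ i →
    embaralharLoopA cs i acc =
      acc ++ (cs.take (11 - i)).map (fun c => Char.ofNat (c.toNat + 4)) ++
             (cs.drop (11 - i)).map (fun c => Char.ofNat (c.toNat + 7)) := by
  induction cs with
  | nil => intro i acc _; simp [embaralharLoopA]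
  | cons c rest ih =>
    intro i acc hi
    by_cases h : i ≤ 10
    · have h11 : 11 - i = (10 - i) + 1 := by omega
      have h10 : 11 - (i + 1) = 10 - i := by omega
      simp only [embaralharLoopA, if_pos h, h11, List.take_succ_cons, List.drop_succ_cons,
        ih (i + 1) _ (by omega), h10, List.map_cons]
      simp
    · have h0 : 11 - i = 0 := by omega
      have h0' : 11 - (i + 1) = 0 := by omega
      simp only [embaralharLoopA, if_neg h, ih (i + 1) _ (by omega), h0, h0',
        List.take_zero, List.drop_zero, List.map_cons]
      simp

-- ===== VERDICT (by name: the statement is the Claim_ definition above) =====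
theorem embaralhar_string_spec : Claim_equal_embaralhar_string := by
  intro str _
  unfold Spec_embaralhar_string embaralhar_string embaralhar_string_alt
  rw [embaralharLoopA_eq str.toList 1 [] (by omega)]
  simp
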